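-- pv_equiv track=rewrite | github.com/ComparativeGenomicsToolkit/cactus | src/cactus/blast/upconvertCoordinates.py | getSequenceRanges
-- ===== SOURCE A (Python) =====
-- from collections import defaultdict
--
-- def getSequenceRanges(fa):
--     """Get dict of (untrimmed header) -> [(start, non-inclusive end)] mappings
--     from a trimmed fasta."""
--     ret = defaultdict(list)
--     curSeq = ""
--     curHeader = None
--     curTrimmedStart = None
--     for line in fa:
--         line = line.strip()
--         if line == '':
--             continue
--         if line[0] == '>':
--             if curHeader is not None:
--                 # Add previous seq info to dict
--                 trimmedRange = (curTrimmedStart,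
--                                 curTrimmedStart + len(curSeq))
--                 untrimmedHeader = "|".join(curHeader.split("|")[:-1])
--                 ret[untrimmedHeader].append(trimmedRange)
--             curHeader = line[1:].split()[0]
--             curTrimmedStart = int(curHeader.split('|')[-1])
--             curSeq = ""
--         else:
--             curSeq += line
--     if curHeader is not None:
--         # Add final seq info to dict
--         trimmedRange = (curTrimmedStart,
--                         curTrimmedStart + len(curSeq))
--         untrimmedHeader = "|".join(curHeader.split("|")[:-1])
--         ret[untrimmedHeader].append(trimmedRange)
--     for key in list(ret.keys()):
--         # Sort by range's start pos
--         ret[key] = sorted(ret[key], key=lambda x: x[0])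
--     return ret
-- ===== SOURCE B (Python) =====
-- def getSequenceRanges(fa):
--     """Get dict of (untrimmed header) -> [(start, non-inclusive end)] mappings
--     from a trimmed fasta."""
--     # Pass 1: collect (header token, total sequence length) records in order.
--     records = []
--     for line in fa:
--         line = line.strip()
--         if not line:
--             continue
--         if line.startswith('>'):
--             records.append((line[1:].split()[0], 0))
--         elif records:
--             header, n = records[-1]
--             records[-1] = (header, n + len(line))
--     # Pass 2: turn each record into (untrimmed header, range).
--     pairs = []
--     for header, n in records:
--         fields = header.split('|')
--         start = int(fields[-1])
--         pairs.append(('|'.join(fields[:-1]), (start, start + n)))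
--     # Group by key (first-occurrence order) and sort each group by start.
--     return {k: sorted([r for q, r in pairs if q == k], key=lambda x: x[0])
--             for k in dict.fromkeys(q for q, _ in pairs)}
-- ===== Notes on version B (the rewrite author's own statement) =====
-- stated objective: alternative
-- what changed: A's single pass with a defaultdict, mutable curSeq/curHeader state and two duplicated flush blocks is replaced by two plain passes (collect (header, total length) records, then map records to (key, range) pairs) with grouping done by first-occurrence key over the pair list instead of dict appends.
import Mathlib
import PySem

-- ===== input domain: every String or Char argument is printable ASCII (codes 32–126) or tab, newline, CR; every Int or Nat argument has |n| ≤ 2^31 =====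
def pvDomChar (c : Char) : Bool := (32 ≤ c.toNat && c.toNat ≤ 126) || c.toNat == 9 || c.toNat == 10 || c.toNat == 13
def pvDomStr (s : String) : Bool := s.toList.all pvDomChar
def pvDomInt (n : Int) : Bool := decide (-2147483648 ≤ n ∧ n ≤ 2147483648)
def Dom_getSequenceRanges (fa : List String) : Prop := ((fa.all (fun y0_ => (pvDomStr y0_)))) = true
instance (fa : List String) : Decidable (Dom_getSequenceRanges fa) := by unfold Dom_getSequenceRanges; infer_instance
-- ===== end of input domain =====

-- B replaces A's defaultdict-with-deferred-flush parse by two plain passes (records, then pairs)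
-- and groups by first-occurrence key with a filter; objective: simpler decomposition, same cost.

-- ===== PORT A =====
-- Python's curHeader/curTrimmedStart are None exactly together; ported as one Option pair.
-- Loop state: (ret, curSeq, (curHeader, curTrimmedStart)).

-- the two identical flush blocks of A ('Add previous/final seq info to dict')
def pvFlushA (ret : PySem.Dict String (List (Int × Int))) (curSeq : String)
    (cur : Option (String × Int)) : PySem.Dict String (List (Int × Int)) :=
  match cur with
  | none => ret
  | some (h, s) =>
    let trimmedRange : Int × Int := (s, s + PySem.Str.len curSeq)
    let untrimmedHeader := PySem.Str.join "|" (((PySem.Str.split? h "|").getD []).dropLast)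
    -- ret[untrimmedHeader].append(trimmedRange): defaultdict(list) access-then-append
    ret.insert untrimmedHeader (ret.getD untrimmedHeader [] ++ [trimmedRange])

def pvStepA (st : PySem.Dict String (List (Int × Int)) × String × Option (String × Int))
    (line : String) : PySem.Dict String (List (Int × Int)) × String × Option (String × Int) :=
  let l := PySem.Str.strip line
  if l = "" then st
  else if PySem.Str.pyGet? l 0 = some '>' then
    let ret := pvFlushA st.1 st.2.1 st.2.2
    -- line[1:].split()[0]; the [0] raises IndexError on [] — excluded by Pre_, headD "" there
    let curHeader := (PySem.Str.split₀ (PySem.Str.slice l (some 1) none)).headD ""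
    -- int(curHeader.split('|')[-1]); ValueError excluded by Pre_, getD 0 there
    -- (split? with the non-empty separator "|" is never none)
    let curTrimmedStart :=
      (PySem.Int.ofStr? (((PySem.Str.split? curHeader "|").getD []).getLastD "")).getD 0
    (ret, "", some (curHeader, curTrimmedStart))
  else (st.1, st.2.1 ++ l, st.2.2)

def getSequenceRanges (fa : List String) : List (String × List (Int × Int)) :=
  let st := fa.foldl pvStepA (PySem.Dict.empty, "", none)
  let ret := pvFlushA st.1 st.2.1 st.2.2
  -- for key in list(ret.keys()): ret[key] = sorted(ret[key], key=lambda x: x[0])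
  let ret := ret.keys.foldl
    (fun d k => d.insert k (PySem.List.sorted (d.getD k []) (fun x => x.1))) ret
  ret.items

-- ===== PORT B =====
-- pass 1 body: records of (header token, running sequence length)
def pvRecStep (recs : List (String × Int)) (line : String) : List (String × Int) :=
  let l := PySem.Str.strip line
  if l = "" then recs
  else if PySem.Str.startswith l ">" then
    recs ++ [((PySem.Str.split₀ (PySem.Str.slice l (some 1) none)).headD "", 0)]
  else if recs.isEmpty then recs
  else recs.dropLast ++ [((recs.getLastD ("", 0)).1, (recs.getLastD ("", 0)).2 + PySem.Str.len l)]

-- pass 2 body: record -> (untrimmed header, (start, end))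
def pvPair (r : String × Int) : String × (Int × Int) :=
  let fields := (PySem.Str.split? r.1 "|").getD []
  let start := (PySem.Int.ofStr? (fields.getLastD "")).getD 0
  (PySem.Str.join "|" fields.dropLast, (start, start + r.2))

def getSequenceRanges_alt (fa : List String) : List (String × List (Int × Int)) :=
  let pairs := (fa.foldl pvRecStep []).map pvPair
  (PySem.List.dedup (pairs.map (·.1))).map
    (fun k => (k, PySem.List.sorted ((pairs.filter (fun p => p.1 == k)).map (·.2)) (fun x => x.1)))

-- ===== PRECONDITION & SPEC =====
-- Pre_ excludes exactly the inputs where the Python A raises: a header line that is '>' with no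
-- token after it (IndexError on [0]) or whose token's last '|'-field is not an int literal (ValueError).
def Pre_getSequenceRanges (fa : List String) : Prop :=
  ∀ line ∈ fa,
    PySem.Str.strip line ≠ "" →
    PySem.Str.pyGet? (PySem.Str.strip line) 0 = some '>' →
      (PySem.Str.split₀ (PySem.Str.slice (PySem.Str.strip line) (some 1) none)) ≠ [] ∧
      (PySem.Int.ofStr?
        (((PySem.Str.split?
            ((PySem.Str.split₀ (PySem.Str.slice (PySem.Str.strip line) (some 1) none)).headD "")
            "|").getD []).getLastD "")).isSome = true
instance (fa : List String) : Decidable (Pre_getSequenceRanges fa) := by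
  unfold Pre_getSequenceRanges; infer_instance

def pvWitness_getSequenceRanges : List String :=
  [">chr1|10", "ACGT", "AC", ">chr1|0 trimmed", "G", "", ">chr2|x|5"]

def Spec_getSequenceRanges (fa : List String) (out : List (String × List (Int × Int))) : Prop := out = getSequenceRanges_alt fa
instance (fa : List String) (out : List (String × List (Int × Int))) : Decidable (Spec_getSequenceRanges fa out) := by unfold Spec_getSequenceRanges; infer_instance

-- ===== CLAIM (what is proved, stated in full; the proofs are below) =====
def Claim_equal_getSequenceRanges : Prop := ∀ (fa : List String), Dom_getSequenceRanges fa → Pre_getSequenceRanges fa → Spec_getSequenceRanges fa (getSequenceRanges fa)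

-- ===== LEMMAS AND PROOFS =====

-- the defaultdict append loop, abstracted
def pvBuild (ps : List (String × (Int × Int))) : PySem.Dict String (List (Int × Int)) :=
  ps.foldl (fun d p => d.insert p.1 (d.getD p.1 [] ++ [p.2])) PySem.Dict.empty

-- grouping by first-occurrence key
def pvGroup (ps : List (String × (Int × Int))) : List (String × List (Int × Int)) :=
  (PySem.List.dedup (ps.map (·.1))).map
    (fun k => (k, (ps.filter (fun p => p.1 == k)).map (·.2)))

theorem pvGroup_fst (ps : List (String × (Int × Int))) :
    (pvGroup ps).map (·.1) = PySem.List.dedup (ps.map (·.1)) := by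
  simp [pvGroup, Function.comp_def]

-- L1: the defaultdict build's items are exactly the dedup/filter grouping
theorem pvBuild_items (ps : List (String × (Int × Int))) :
    (pvBuild ps).items = pvGroup ps := by
  induction ps using List.reverseRecOn with
  | nil => rfl
  | append_singleton ps p ih =>
    have hstep : pvBuild (ps ++ [p])
        = (pvBuild ps).insert p.1 ((pvBuild ps).getD p.1 [] ++ [p.2]) := by
      simp [pvBuild, List.foldl_append]
    set d := pvBuild ps with hd
    have hkeys : d.keys = PySem.List.dedup (ps.map (·.1)) := by
      show d.items.map (·.1) = _
      rw [ih]; simp [pvGroup, Function.comp_def]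
    have hnd : d.keys.Nodup := by rw [hkeys]; exact PySem.List.nodup_dedup _
    rw [hstep]
    by_cases hk : p.1 ∈ ps.map (·.1)
    · have hmemk : p.1 ∈ d.keys := by rw [hkeys]; exact (PySem.List.mem_dedup _ _).2 hk
      have hc : d.contains p.1 = true := (PySem.Dict.contains_iff_mem_keys d p.1).2 hmemk
      have hmemitem : (p.1, (ps.filter (fun q => q.1 == p.1)).map (·.2)) ∈ d.items := by
        rw [ih]
        unfold pvGroup
        exact List.mem_map_of_mem ((PySem.List.mem_dedup _ _).2 hk)
      have hget : d.getD p.1 [] = (ps.filter (fun q => q.1 == p.1)).map (·.2) := by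
        have := PySem.Dict.get?_of_mem_items d hmemitem hnd
        show (d.get? p.1).getD [] = _
        rw [this]; rfl
      rw [PySem.Dict.items_insert_of_contains d _ hc, ih, hget]
      unfold pvGroup
      have hded : PySem.List.dedup ((ps ++ [p]).map (·.1)) = PySem.List.dedup (ps.map (·.1)) := by
        simp only [List.map_append, List.map_cons, List.map_nil, PySem.List.dedup_eq_ofList,
          PySem.Set.ofList_append_singleton]
        exact PySem.Set.add_of_mem ((PySem.Set.mem_ofList _ _).2 hk)
      rw [hded, List.map_map]
      refine List.map_congr_left (fun k hkmem => ?_)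
      by_cases hkp : k = p.1
      · subst hkp
        simp only [Function.comp, beq_self_eq_true, if_pos]
        simp [List.filter_append]
      · simp only [Function.comp]
        rw [if_neg (by simp [hkp])]
        have : (ps ++ [p]).filter (fun q => q.1 == k) = ps.filter (fun q => q.1 == k) := by
          simp [List.filter_append, Ne.symm hkp]
        rw [this]
    · have hnc : d.contains p.1 = false := by
        by_contra hcon
        have := (PySem.Dict.contains_iff_mem_keys d p.1).1 (by simpa using hcon)
        rw [hkeys] at this
        exact hk ((PySem.List.mem_dedup _ _).1 this)
      have hget : d.getD p.1 [] = [] := by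
        show (d.get? p.1).getD [] = _
        rw [(PySem.Dict.get?_eq_none_iff_contains d p.1).2 hnc]; rfl
      rw [PySem.Dict.items_insert_of_not_contains d _ hnc, ih, hget]
      unfold pvGroup
      have hded : PySem.List.dedup ((ps ++ [p]).map (·.1))
          = PySem.List.dedup (ps.map (·.1)) ++ [p.1] := by
        simp only [List.map_append, List.map_cons, List.map_nil, PySem.List.dedup_eq_ofList,
          PySem.Set.ofList_append_singleton]
        exact PySem.Set.add_of_not_mem (fun hmem => hk ((PySem.Set.mem_ofList _ _).1 hmem))
      rw [hded, List.map_append]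
      congr 1
      · refine List.map_congr_left (fun k hkmem => ?_)
        have hkp : k ≠ p.1 := by
          rintro rfl
          exact hk ((PySem.List.mem_dedup _ _).1 hkmem)
        have : (ps ++ [p]).filter (fun q => q.1 == k) = ps.filter (fun q => q.1 == k) := by
          simp [List.filter_append, Ne.symm hkp]
        rw [this]
      · have hfil : ps.filter (fun q => q.1 == p.1) = [] := by
          refine List.filter_eq_nil_iff.2 (fun q hq => ?_)
          simp only [beq_iff_eq]
          exact fun heq => hk (heq ▸ List.mem_map_of_mem hq)
        simp [List.filter_append, hfil]

-- L2: the sort-loop over the keys of a nodup-keyed dict maps f over the item values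
theorem pvSortFold (f : List (Int × Int) → List (Int × Int)) (l : List String)
    (e : PySem.Dict String (List (Int × Int)))
    (hnd : e.keys.Nodup) (hsub : ∀ k ∈ l, e.contains k = true) (hl : l.Nodup) :
    (l.foldl (fun d k => d.insert k (f (d.getD k []))) e).items
      = e.items.map (fun p => if p.1 ∈ l then (p.1, f p.2) else p) := by
  induction l generalizing e with
  | nil => simp
  | cons k rest ih =>
    have hck : e.contains k = true := hsub k (List.mem_cons_self)
    set e' := e.insert k (f (e.getD k [])) with he'
    have hkeys' : e'.keys = e.keys := PySem.Dict.keys_insert_of_contains e _ hck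
    have hnd' : e'.keys.Nodup := PySem.Dict.nodup_keys_insert e _ _ hnd
    have hsub' : ∀ k' ∈ rest, e'.contains k' = true := by
      intro k' hk'
      rw [he', PySem.Dict.contains_insert]
      simp [hsub k' (List.mem_cons_of_mem _ hk')]
    have hitems' : e'.items = e.items.map (fun p => if p.1 == k then (k, f (e.getD k [])) else p) :=
      PySem.Dict.items_insert_of_contains e _ hck
    rw [List.foldl_cons, ih e' hnd' hsub' (List.nodup_cons.1 hl).2, hitems', List.map_map]
    refine List.map_congr_left (fun p hp => ?_)
    have hknr : k ∉ rest := (List.nodup_cons.1 hl).1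
    simp only [Function.comp]
    by_cases hpk : p.1 = k
    · have hgd : e.getD k [] = p.2 := by
        show (e.get? k).getD [] = _
        rw [PySem.Dict.get?_of_mem_items e (k := k) (v := p.2) (by rw [← hpk]; exact hp) hnd]
        rfl
      have h1 : (if (p.1 == k) = true then (k, f (e.getD k [])) else p) = (k, f p.2) := by
        simp [hpk, hgd]
      rw [h1, if_neg (by simpa using hknr), if_pos (by simp [hpk, List.mem_cons])]
      simp [hpk]
    · have h1 : (if (p.1 == k) = true then (k, f (e.getD k [])) else p) = p := by simp [hpk]
      rw [h1]
      by_cases hpr : p.1 ∈ rest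
      · rw [if_pos hpr, if_pos (List.mem_cons_of_mem _ hpr)]
      · rw [if_neg hpr, if_neg (by simp [List.mem_cons, hpk, hpr])]

-- start value recomputed by pvPair equals the one A stores at header time
def pvStart (h : String) : Int :=
  (PySem.Int.ofStr? (((PySem.Str.split? h "|").getD []).getLastD "")).getD 0

-- the invariant tying A's loop state to B's record list
def pvInv (st : PySem.Dict String (List (Int × Int)) × String × Option (String × Int))
    (recs : List (String × Int)) : Prop :=
  match st.2.2 with
  | none => recs = [] ∧ st.1 = PySem.Dict.empty
  | some (h, s) => ∃ recs₀, recs = recs₀ ++ [(h, PySem.Str.len st.2.1)] ∧ s = pvStart h ∧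
      st.1 = pvBuild (recs₀.map pvPair)

-- a stripped non-empty line starts with '>' iff its first character is '>'
theorem pvStartsGt (l : String) (hne : l.toList ≠ []) :
    (PySem.Str.startswith l ">" = true) ↔ PySem.Str.pyGet? l 0 = some '>' := by
  cases hcs : l.toList with
  | nil => exact absurd hcs hne
  | cons c cs =>
    have h1 : PySem.Str.startswith l ">" = true ↔ (">".toList) <+: l.toList := by
      rw [PySem.Str.startswith_eq]; exact PySem.Chars.startswith_iff _ _
    have h2 : PySem.Str.pyGet? l 0 = l.toList[0]? := by
      simpa using PySem.Str.pyGet?_natCast l (0 : Nat)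
    rw [h1, h2, hcs]
    constructor
    · rintro ⟨t, ht⟩
      simp only [show (">".toList) = ['>'] from rfl] at ht
      simp [← ht]
    · intro hc
      simp only [List.getElem?_cons_zero, Option.some_inj] at hc
      exact ⟨cs, by simp [show (">".toList) = ['>'] from rfl, hc]⟩

theorem pvInv_flush (st : PySem.Dict String (List (Int × Int)) × String × Option (String × Int))
    (recs : List (String × Int)) (h : pvInv st recs) :
    pvFlushA st.1 st.2.1 st.2.2 = pvBuild (recs.map pvPair) := by
  obtain ⟨ret, curSeq, cur⟩ := st
  cases cur with
  | none =>
    obtain ⟨hr, hret⟩ := h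
    rw [hr, hret]; rfl
  | some p =>
    obtain ⟨hh, hs⟩ := p
    obtain ⟨recs₀, hrecs, hstart, hret⟩ := h
    simp only at hrecs hstart hret
    rw [hrecs]
    simp only [pvFlushA, pvBuild, pvPair, List.map_append, List.map_cons, List.map_nil,
      List.foldl_append, List.foldl_cons, List.foldl_nil, hret, hstart]
    rfl

theorem pvInv_step (st : PySem.Dict String (List (Int × Int)) × String × Option (String × Int))
    (recs : List (String × Int)) (line : String) (h : pvInv st recs) :
    pvInv (pvStepA st line) (pvRecStep recs line) := by
  obtain ⟨ret, curSeq, cur⟩ := st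
  by_cases h0 : PySem.Str.strip line = ""
  · have hA : pvStepA (ret, curSeq, cur) line = (ret, curSeq, cur) := by
      simp only [pvStepA]; rw [if_pos h0]
    have hB : pvRecStep recs line = recs := by
      simp only [pvRecStep]; rw [if_pos h0]
    rw [hA, hB]; exact h
  · have hne : (PySem.Str.strip line).toList ≠ [] := by
      intro hx
      exact h0 (String.toList_eq_nil_iff.mp hx)
    by_cases h1 : PySem.Str.pyGet? (PySem.Str.strip line) 0 = some '>'
    · have hsw : PySem.Str.startswith (PySem.Str.strip line) ">" = true :=
        (pvStartsGt _ hne).2 h1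
      have hA : pvStepA (ret, curSeq, cur) line
          = (pvFlushA ret curSeq cur, "",
             some ((PySem.Str.split₀ (PySem.Str.slice (PySem.Str.strip line) (some 1) none)).headD "",
                   pvStart ((PySem.Str.split₀ (PySem.Str.slice (PySem.Str.strip line) (some 1) none)).headD ""))) := by
        simp only [pvStepA, pvStart]; rw [if_neg h0, if_pos h1]
      have hB : pvRecStep recs line
          = recs ++ [((PySem.Str.split₀ (PySem.Str.slice (PySem.Str.strip line) (some 1) none)).headD "", 0)] := by
        simp only [pvRecStep]; rw [if_neg h0, if_pos hsw]
      rw [hA, hB]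
      exact ⟨recs, by rw [show PySem.Str.len "" = 0 from rfl],
        rfl, pvInv_flush (ret, curSeq, cur) recs h⟩
    · have hsw : ¬ (PySem.Str.startswith (PySem.Str.strip line) ">" = true) :=
        fun hx => h1 ((pvStartsGt _ hne).1 hx)
      have hA : pvStepA (ret, curSeq, cur) line
          = (ret, curSeq ++ PySem.Str.strip line, cur) := by
        simp only [pvStepA]; rw [if_neg h0, if_neg h1]
      rw [hA]
      cases cur with
      | none =>
        obtain ⟨hr, hret⟩ := h
        simp only at hr hret
        rw [hr]
        have hB : pvRecStep [] line = [] := by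
          simp only [pvRecStep]; rw [if_neg h0, if_neg hsw]; rfl
        rw [hB]
        exact ⟨rfl, hret⟩
      | some p =>
        obtain ⟨hh, hs⟩ := p
        obtain ⟨recs₀, hrecs, hstart, hret⟩ := h
        simp only at hrecs hstart hret
        rw [hrecs]
        have hB : pvRecStep (recs₀ ++ [(hh, PySem.Str.len curSeq)]) line
            = recs₀ ++ [(hh, PySem.Str.len curSeq + PySem.Str.len (PySem.Str.strip line))] := by
          simp only [pvRecStep]; rw [if_neg h0, if_neg hsw, if_neg (by simp)]
          simp
        rw [hB]
        exact ⟨recs₀, by rw [PySem.Str.len_append], hstart, hret⟩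

theorem pvInv_foldl (fa : List String)
    (st : PySem.Dict String (List (Int × Int)) × String × Option (String × Int))
    (recs : List (String × Int)) (h : pvInv st recs) :
    pvInv (fa.foldl pvStepA st) (fa.foldl pvRecStep recs) := by
  induction fa generalizing st recs with
  | nil => exact h
  | cons x xs ih => exact ih _ _ (pvInv_step st recs x h)


-- ===== VERDICT (by name: the statement is the Claim_ definition above) =====
theorem getSequenceRanges_spec : Claim_equal_getSequenceRanges := by
  intro fa _hdom _hpre
  unfold Spec_getSequenceRanges getSequenceRanges getSequenceRanges_alt
  have hinv : pvInv (fa.foldl pvStepA (PySem.Dict.empty, "", none)) (fa.foldl pvRecStep []) :=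
    pvInv_foldl fa _ _ ⟨rfl, rfl⟩
  have hflush := pvInv_flush _ _ hinv
  simp only [hflush]
  set pairs := (fa.foldl pvRecStep []).map pvPair with hpairs
  have hkeys : (pvBuild pairs).keys = PySem.List.dedup (pairs.map (·.1)) := by
    show (pvBuild pairs).items.map (·.1) = _
    rw [pvBuild_items, pvGroup_fst]
  have hnd : (pvBuild pairs).keys.Nodup := by rw [hkeys]; exact PySem.List.nodup_dedup _
  rw [pvSortFold (fun v => PySem.List.sorted v (fun x => x.1)) _ _ hnd
      (fun k hk => (PySem.Dict.contains_iff_mem_keys _ _).2 hk) hnd]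
  rw [pvBuild_items]
  have hmem : ∀ p ∈ pvGroup pairs, p.1 ∈ (pvBuild pairs).keys := by
    intro p hp
    have : p.1 ∈ (pvBuild pairs).items.map (·.1) := by
      rw [pvBuild_items]; exact List.mem_map_of_mem hp
    exact this
  rw [List.map_congr_left (fun p hp => if_pos (hmem p hp))]
  unfold pvGroup
  rw [List.map_map]
  rfl
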